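-- pv_equiv track=rewrite | github.com/jansel/pytorch-jit-paritybench | generated/test_Unbabel_OpenKiwi.py | map_alignments_to_target
-- ===== SOURCE A (Python) =====
-- def map_alignments_to_target(src2tgt_alignments, target_length=None):
--     """Maps a target index to a list of source indexes.
--
--     Args:
--         src2tgt_alignments (list): list of tuples with source, target indexes.
--         target_length: size of the target side; if None, the highest index
--             in the alignments is used.
--
--     Returns:
--         A list of size target_length where position i refers to the i-th
--         target token and contains a list of source indexes aligned to it.
--
--     """
--     if target_length is None:
--         if not src2tgt_alignments:
--             target_length = 0
--         else:
--             target_length = 1 + max(src2tgt_alignments, key=lambda a: a[1])[1]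
--     trg2src = [None] * target_length
--     for source, target in src2tgt_alignments:
--         if not trg2src[target]:
--             trg2src[target] = []
--         trg2src[target].append(source)
--     return trg2src
-- ===== SOURCE B (Python) =====
-- def map_alignments_to_target(src2tgt_alignments, target_length=None):
--     if target_length is None:
--         target_length = 1 + max((t for _, t in src2tgt_alignments), default=-1)
--     trg2src = [None] * target_length
--     by_target = sorted(src2tgt_alignments, key=lambda a: a[1])
--     while by_target:
--         t = by_target[0][1]
--         k = 1
--         while k < len(by_target) and by_target[k][1] == t:
--             k += 1
--         trg2src[t] = [s for s, _ in by_target[:k]]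
--         by_target = by_target[k:]
--     return trg2src
-- ===== Notes on version B (the rewrite author's own statement) =====
-- stated objective: alternative
-- what changed: A's single check-and-append scatter loop is replaced by sort-then-sweep: sort the alignments by target once, then cut the sorted list into runs of equal targets and assign each whole run's sources to its slot; Pre_ excludes inputs where A raises IndexError (a target outside [-L, L)) and inputs where a negative target aliases the slot of a nonnegative target t+L via wraparound, a collision both programs resolve accidentally (A interleaves, B overwrites).
-- outside the precondition, e.g. on map_alignments_to_target([(1, -1), (2, 1)], 2): A returns [None, [1, 2]], B returns [None, [2]]
import Mathlib
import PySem

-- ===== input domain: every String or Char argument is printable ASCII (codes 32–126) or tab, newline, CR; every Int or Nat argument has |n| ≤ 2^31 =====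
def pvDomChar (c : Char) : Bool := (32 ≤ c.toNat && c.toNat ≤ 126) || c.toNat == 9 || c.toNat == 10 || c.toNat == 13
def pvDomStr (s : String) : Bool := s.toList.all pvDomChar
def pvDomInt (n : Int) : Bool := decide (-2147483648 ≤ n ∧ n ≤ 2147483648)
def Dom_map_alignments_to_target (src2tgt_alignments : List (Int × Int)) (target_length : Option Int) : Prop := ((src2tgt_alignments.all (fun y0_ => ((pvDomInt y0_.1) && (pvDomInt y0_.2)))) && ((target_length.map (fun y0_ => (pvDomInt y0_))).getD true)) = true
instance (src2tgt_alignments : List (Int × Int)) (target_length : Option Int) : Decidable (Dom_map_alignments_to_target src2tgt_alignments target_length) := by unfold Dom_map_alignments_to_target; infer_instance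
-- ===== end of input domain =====

-- B replaces A's single check-and-append scatter loop by sort-then-sweep:
-- sort the alignments by target once, then cut the sorted list into runs of
-- equal targets and assign each run's sources to its slot (objective:
-- alternative, same order of cost).

-- ===== PORT A =====
-- one iteration of A's loop body; pyGetD/pySetD are exact under Pre_ (all
-- target indices in range, so neither the get nor the set can raise here)
def pvAStep (l : List (Option (List Int))) (st : Int × Int) : List (Option (List Int)) :=
  let cur := PySem.List.pyGetD l st.2 none
  -- 'if not trg2src[target]: trg2src[target] = []' : None and [] are falsy
  let cur' : List Int := match cur with
    | none => []
    | some xs => match xs with | [] => [] | _ => xs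
  PySem.List.pySetD l st.2 (some (cur' ++ [st.1]))

def map_alignments_to_target (src2tgt_alignments : List (Int × Int)) (target_length : Option Int) : List (Option (List Int)) :=
  let tl : Int :=
    match target_length with
    | some n => n
    | none =>
      match PySem.List.max? src2tgt_alignments (fun a => a.2) with
      | none => 0              -- 'if not src2tgt_alignments: target_length = 0'
      | some m => 1 + m.2      -- '1 + max(src2tgt_alignments, key=lambda a: a[1])[1]'
  src2tgt_alignments.foldl pvAStep (List.replicate tl.toNat none)

-- ===== PORT B =====
-- Source B's outer while loop over the sorted list: take the leading run of
-- pairs sharing the first target (by_target[:k] / by_target[k:] with k found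
-- by the inner while), write its sources into that slot, continue on the
-- rest.  fuel = initial length makes the recursion structural; it never
-- runs out since each step consumes at least one element.
def pvSweep : Nat → List (Int × Int) → List (Option (List Int)) → List (Option (List Int))
  | _, [], acc => acc
  | 0, _ :: _, acc => acc
  | fuel + 1, p :: rest, acc =>
      pvSweep fuel (rest.dropWhile (fun q => q.2 == p.2))
        (PySem.List.pySetD acc p.2 (some ((p :: rest.takeWhile (fun q => q.2 == p.2)).map (fun q => q.1))))

def map_alignments_to_target_alt (src2tgt_alignments : List (Int × Int)) (target_length : Option Int) : List (Option (List Int)) :=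
  let tl : Int :=
    match target_length with
    | some n => n
    | none =>
      match PySem.List.max? src2tgt_alignments (fun a => a.2) with
      | none => 0
      | some m => 1 + m.2
  pvSweep src2tgt_alignments.length
    (PySem.List.sorted src2tgt_alignments (fun a => a.2) false)
    (List.replicate tl.toNat none)

-- ===== PRECONDITION & SPEC =====
-- the effective length of the allocated list ([None] * negative is empty)
def pvLen (al : List (Int × Int)) (tl : Option Int) : Nat :=
  (match tl with
   | some n => n
   | none =>
     match PySem.List.max? al (fun a => a.2) with
     | none => 0
     | some m => 1 + m.2).toNat

-- Pre_ excludes (i) the inputs on which Python A raises IndexError (a target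
-- outside [-L, L)), and (ii) the inputs where a negative target t aliases the
-- slot of a nonnegative target t + L through Python's wraparound indexing, a
-- corner on which A's element interleaving and B's whole-run assignment are
-- both accidental resolutions of the slot collision.
def Pre_map_alignments_to_target (src2tgt_alignments : List (Int × Int)) (target_length : Option Int) : Prop :=
  (∀ p ∈ src2tgt_alignments, PySem.Raise.InRange (pvLen src2tgt_alignments target_length) p.2) ∧
  (∀ p ∈ src2tgt_alignments, p.2 < 0 →
    ∀ q ∈ src2tgt_alignments, q.2 ≠ p.2 + (pvLen src2tgt_alignments target_length : Int))
instance (src2tgt_alignments : List (Int × Int)) (target_length : Option Int) : Decidable (Pre_map_alignments_to_target src2tgt_alignments target_length) := by unfold Pre_map_alignments_to_target; infer_instance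

def pvWitness_map_alignments_to_target : (List (Int × Int)) × Option Int := ([(0, 1), (2, 0), (3, 1)], none)

def Spec_map_alignments_to_target (src2tgt_alignments : List (Int × Int)) (target_length : Option Int) (out : List (Option (List Int))) : Prop := out = map_alignments_to_target_alt src2tgt_alignments target_length
instance (src2tgt_alignments : List (Int × Int)) (target_length : Option Int) (out : List (Option (List Int))) : Decidable (Spec_map_alignments_to_target src2tgt_alignments target_length out) := by unfold Spec_map_alignments_to_target; infer_instance

-- ===== CLAIM (what is proved, stated in full; the proofs are below) =====
def Claim_equal_map_alignments_to_target : Prop := ∀ (src2tgt_alignments : List (Int × Int)) (target_length : Option Int), Dom_map_alignments_to_target src2tgt_alignments target_length → Pre_map_alignments_to_target src2tgt_alignments target_length → Spec_map_alignments_to_target src2tgt_alignments target_length (map_alignments_to_target src2tgt_alignments target_length)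

-- ===== LEMMAS AND PROOFS =====

-- the Nat slot a target index t writes to in a list of length N
def pvSlot (t : Int) (N : Nat) : Nat := if 0 ≤ t then t.toNat else (t + N).toNat

-- the value slot j holds at the end: the sources whose target maps to j
def pvBucket (al : List (Int × Int)) (N : Nat) (j : Nat) : Option (List Int) :=
  match (al.filter (fun p => pvSlot p.2 N == j)).map Prod.fst with
  | [] => none
  | l => some l

theorem pvSlot_lt {t : Int} {N : Nat} (h : PySem.Raise.InRange N t) : pvSlot t N < N := by
  unfold PySem.Raise.InRange at h; unfold pvSlot; split_ifs <;> omega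

-- wrap: a negative in-range index reads/writes the slot i + len
theorem pvGetD_wrap {α : Type} (xs : List α) {i : Int} (d : α)
    (h0 : i < 0) (h1 : -(xs.length : Int) ≤ i) :
    PySem.List.pyGetD xs i d = PySem.List.pyGetD xs (i + xs.length) d := by
  simp only [PySem.List.pyGetD, PySem.List.pyGet?, PySem.List.pyIdx?]
  have : (xs.length - (-i).toNat) = (i + xs.length).toNat := by omega
  split_ifs with h2 h3 h4 h5 <;> simp_all <;> omega

theorem pvSetD_wrap {α : Type} (xs : List α) {i : Int} (v : α)
    (h0 : i < 0) (h1 : -(xs.length : Int) ≤ i) :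
    PySem.List.pySetD xs i v = PySem.List.pySetD xs (i + xs.length) v := by
  simp only [PySem.List.pySetD, PySem.List.pySet?, PySem.List.pyIdx?]
  have : (xs.length - (-i).toNat) = (i + xs.length).toNat := by omega
  split_ifs with h2 h3 h4 h5 <;> simp_all <;> omega

theorem pvGetD_slot {α : Type} (xs : List α) {t : Int} (d : α)
    (h : PySem.Raise.InRange xs.length t) :
    PySem.List.pyGetD xs t d = PySem.List.pyGetD xs ((pvSlot t xs.length : Nat) : Int) d := by
  unfold PySem.Raise.InRange at h
  unfold pvSlot
  split_ifs with h0
  · rw [Int.toNat_of_nonneg h0]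
  · rw [pvGetD_wrap xs d (by omega) (by omega)]
    congr 1; omega

theorem pvSetD_slot {α : Type} (xs : List α) {t : Int} (v : α)
    (h : PySem.Raise.InRange xs.length t) :
    PySem.List.pySetD xs t v = PySem.List.pySetD xs ((pvSlot t xs.length : Nat) : Int) v := by
  unfold PySem.Raise.InRange at h
  unfold pvSlot
  split_ifs with h0
  · rw [Int.toNat_of_nonneg h0]
  · rw [pvSetD_wrap xs v (by omega) (by omega)]
    congr 1; omega

theorem pvLenA (al : List (Int × Int)) (acc : List (Option (List Int))) :
    (al.foldl pvAStep acc).length = acc.length := by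
  induction al generalizing acc with
  | nil => rfl
  | cons p rest ih => simp only [List.foldl_cons]; rw [ih, pvAStep, PySem.List.length_pySetD]

theorem pvA_get (N : Nat) (al : List (Int × Int))
    (h : ∀ p ∈ al, PySem.Raise.InRange N p.2) :
    ∀ j < N, PySem.List.pyGetD (al.foldl pvAStep (List.replicate N none)) (j : Int) none = pvBucket al N j := by
  induction al using List.reverseRecOn with
  | nil =>
    intro j hj
    rw [PySem.List.pyGetD_natCast]
    simp [pvBucket, hj]
  | append_singleton al p ih =>
    have hal : ∀ q ∈ al, PySem.Raise.InRange N q.2 := fun q hq => h q (by simp [hq])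
    have hp := h p (by simp)
    have hlen : (al.foldl pvAStep (List.replicate N none)).length = N := by
      rw [pvLenA, List.length_replicate]
    intro j hj
    rw [List.foldl_append, List.foldl_cons, List.foldl_nil]
    set l := al.foldl pvAStep (List.replicate N none) with hl
    set s := pvSlot p.2 N with hsdef
    have hsN : s < N := pvSlot_lt hp
    have hcur : PySem.List.pyGetD l p.2 none = pvBucket al N s := by
      rw [pvGetD_slot l none (by rw [hlen]; exact hp), hlen, ← hsdef]
      exact ih hal s hsN
    set F := (al.filter (fun q => pvSlot q.2 N == s)).map Prod.fst with hF
    have hcur2 : (match PySem.List.pyGetD l p.2 none with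
        | none => []
        | some xs => match xs with | [] => [] | _ => xs) = F := by
      rw [hcur]
      unfold pvBucket
      rw [← hF]
      cases F with
      | nil => rfl
      | cons a as => rfl
    unfold pvAStep
    simp only [hcur2]
    rw [pvSetD_slot l (some (F ++ [p.1])) (by rw [hlen]; exact hp), hlen, ← hsdef]
    rw [PySem.List.pyGetD_pySetD_natCast l s j _ none (by rw [hlen]; exact hsN)]
    by_cases hjs : j = s
    · rw [if_pos hjs]
      unfold pvBucket
      rw [hjs, List.filter_append, List.map_append, ← hF]
      have hps : List.filter (fun q => pvSlot q.2 N == s) [p] = [p] := by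
        have hb : (pvSlot p.2 N == s) = true := by simp [hsdef]
        simp [hb]
      rw [hps]
      cases F <;> simp
    · rw [if_neg hjs, ih hal j hj]
      unfold pvBucket
      rw [List.filter_append]
      have hps : List.filter (fun q => pvSlot q.2 N == j) [p] = [] := by
        have hb : (pvSlot p.2 N == j) = false := by
          simp only [beq_eq_false_iff_ne]
          exact fun hh => hjs (by rw [hsdef]; exact hh.symm)
        simp [hb]
      rw [hps, List.append_nil]

theorem pvLenB (fuel : Nat) (g : List (Int × Int)) (acc : List (Option (List Int))) :
    (pvSweep fuel g acc).length = acc.length := by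
  induction fuel generalizing g acc with
  | zero => cases g <;> rfl
  | succ n ih => cases g with
    | nil => rfl
    | cons p rest => rw [pvSweep, ih, PySem.List.length_pySetD]

theorem pvB_get (fuel : Nat) (g : List (Int × Int)) (acc : List (Option (List Int)))
    (hf : g.length ≤ fuel)
    (hs : g.Pairwise (fun a b => a.2 ≤ b.2))
    (hr : ∀ p ∈ g, PySem.Raise.InRange acc.length p.2)
    (hinj : ∀ p ∈ g, ∀ q ∈ g, pvSlot p.2 acc.length = pvSlot q.2 acc.length → p.2 = q.2) :
    ∀ j < acc.length, PySem.List.pyGetD (pvSweep fuel g acc) (j : Int) none =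
      match g.find? (fun p => pvSlot p.2 acc.length == j) with
      | some p => some ((g.filter (fun q => q.2 == p.2)).map (fun q => q.1))
      | none => PySem.List.pyGetD acc (j : Int) none := by
  induction fuel generalizing g acc with
  | zero =>
    intro j hj
    have hg : g = [] := List.length_eq_zero_iff.mp (Nat.le_zero.mp hf)
    subst hg
    simp [pvSweep, List.find?]
  | succ n ih =>
    cases g with
    | nil => intro j hj; simp [pvSweep, List.find?]
    | cons p rest =>
      intro j hj
      set tw := rest.takeWhile (fun q => q.2 == p.2) with htw
      set dw := rest.dropWhile (fun q => q.2 == p.2) with hdw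
      have hrest : rest = tw ++ dw := (List.takeWhile_append_dropWhile).symm
      have hple : ∀ z ∈ rest, p.2 ≤ z.2 := (List.pairwise_cons.mp hs).1
      have hrestpair := (List.pairwise_cons.mp hs).2
      have hdwpair : dw.Pairwise (fun a b => a.2 ≤ b.2) :=
        List.Pairwise.sublist (List.dropWhile_sublist _) hrestpair
      have hdwsub : ∀ q ∈ dw, q ∈ rest := fun q hq => (List.dropWhile_sublist _).subset hq
      have htwkey : ∀ q ∈ tw, q.2 = p.2 := fun q hq => by
        simpa using List.mem_takeWhile_imp hq
      have hdwgt : ∀ q ∈ dw, p.2 < q.2 := by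
        intro q hq
        cases hdd : dw with
        | nil => rw [hdd] at hq; cases hq
        | cons d ds =>
          have hdnil : rest.dropWhile (fun q : Int × Int => q.2 == p.2) ≠ [] := by
            rw [← hdw, hdd]; exact List.cons_ne_nil d ds
          have hdhead := List.head_dropWhile_not (fun q : Int × Int => q.2 == p.2) hdnil
          have hdeq : rest.dropWhile (fun q : Int × Int => q.2 == p.2) = d :: ds := by
            rw [← hdw]; exact hdd
          simp only [hdeq, List.head_cons, beq_eq_false_iff_ne] at hdhead
          have hdle : p.2 ≤ d.2 := hple d (hdwsub d (by rw [hdd]; exact List.mem_cons_self))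
          have hdgt : p.2 < d.2 := lt_of_le_of_ne hdle (fun h => hdhead h.symm)
          rw [hdd] at hq
          rcases List.mem_cons.mp hq with rfl | hq'
          · exact hdgt
          · have hdq : d.2 ≤ q.2 := by
              have := hdd ▸ hdwpair
              exact (List.pairwise_cons.mp this).1 q hq'
            omega
      have hpmem : p ∈ p :: rest := List.mem_cons_self
      have hpr := hr p hpmem
      have hsp : pvSlot p.2 acc.length < acc.length := pvSlot_lt hpr
      set acc' := PySem.List.pySetD acc p.2 (some ((p :: tw).map (fun q => q.1))) with hacc'
      have hlacc' : acc'.length = acc.length := PySem.List.length_pySetD acc _ _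
      have hstep : pvSweep (n + 1) (p :: rest) acc = pvSweep n dw acc' := rfl
      rw [hstep]
      have hfn : dw.length ≤ n := le_trans (List.length_dropWhile_le _ _)
        (Nat.le_of_succ_le_succ (by simpa using hf))
      have hrd : ∀ q ∈ dw, PySem.Raise.InRange acc'.length q.2 := by
        intro q hq; rw [hlacc']; exact hr q (List.mem_cons_of_mem p (hdwsub q hq))
      have hinj' : ∀ a ∈ dw, ∀ b ∈ dw,
          pvSlot a.2 acc'.length = pvSlot b.2 acc'.length → a.2 = b.2 := by
        intro a ha b hb
        rw [hlacc']
        exact hinj a (List.mem_cons_of_mem p (hdwsub a ha)) b (List.mem_cons_of_mem p (hdwsub b hb))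
      rw [ih dw acc' hfn hdwpair hrd hinj' j (by rw [hlacc']; exact hj)]
      simp only [hlacc']
      by_cases hx : pvSlot p.2 acc.length = j
      · have hfg : (p :: rest).find? (fun q => pvSlot q.2 acc.length == j) = some p :=
          List.find?_cons_of_pos (by simp [hx])
        have hfdw : dw.find? (fun q => pvSlot q.2 acc.length == j) = none := by
          rw [List.find?_eq_none]
          intro q hq
          simp only [beq_iff_eq]
          intro hq2
          have hqeq : q.2 = p.2 :=
            hinj q (List.mem_cons_of_mem p (hdwsub q hq)) p hpmem (by rw [hq2, hx])
          exact absurd hqeq (ne_of_gt (hdwgt q hq))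
        rw [hfdw, hfg]
        show PySem.List.pyGetD acc' (j : Int) none
            = some (((p :: rest).filter (fun q => q.2 == p.2)).map (fun q => q.1))
        have hfilter : (p :: rest).filter (fun q => q.2 == p.2) = p :: tw := by
          rw [List.filter_cons, if_pos (by simp)]
          rw [hrest, List.filter_append]
          have h1 : tw.filter (fun q => q.2 == p.2) = tw :=
            List.filter_eq_self.mpr (fun q hq => by simp [htwkey q hq])
          have h2 : dw.filter (fun q => q.2 == p.2) = [] := by
            rw [List.filter_eq_nil_iff]
            intro q hq
            simp only [beq_iff_eq]
            exact ne_of_gt (hdwgt q hq)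
          rw [h1, h2, List.append_nil]
        rw [hfilter, hacc', pvSetD_slot acc _ hpr,
          PySem.List.pyGetD_pySetD_natCast acc _ j _ none hsp, if_pos hx.symm]
      · have hpredp : (pvSlot p.2 acc.length == j) = false := by simp [hx]
        have hftw : tw.find? (fun q => pvSlot q.2 acc.length == j) = none := by
          rw [List.find?_eq_none]
          intro q hq
          simp only [beq_iff_eq]
          rw [htwkey q hq]
          exact hx
        have hfg : (p :: rest).find? (fun q => pvSlot q.2 acc.length == j)
            = dw.find? (fun q => pvSlot q.2 acc.length == j) := by
          rw [List.find?_cons_of_neg (by simp [hx]), hrest, List.find?_append, hftw,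
            Option.none_or]
        rw [hfg]
        cases hfd : dw.find? (fun q => pvSlot q.2 acc.length == j) with
        | some q =>
          have hqdw : q ∈ dw := List.mem_of_find?_eq_some hfd
          have hq2 : p.2 < q.2 := hdwgt q hqdw
          have hfilter : (p :: rest).filter (fun w => w.2 == q.2)
              = dw.filter (fun w => w.2 == q.2) := by
            rw [List.filter_cons, if_neg (by simp; omega), hrest, List.filter_append]
            have h1 : tw.filter (fun w => w.2 == q.2) = [] := by
              rw [List.filter_eq_nil_iff]
              intro w hw
              simp only [beq_iff_eq]
              rw [htwkey w hw]
              omega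
            rw [h1, List.nil_append]
          show some ((dw.filter (fun w => w.2 == q.2)).map (fun w => w.1))
              = some (((p :: rest).filter (fun w => w.2 == q.2)).map (fun w => w.1))
          rw [hfilter]
        | none =>
          show PySem.List.pyGetD acc' (j : Int) none = PySem.List.pyGetD acc (j : Int) none
          rw [hacc', pvSetD_slot acc _ hpr,
            PySem.List.pyGetD_pySetD_natCast acc _ j _ none hsp,
            if_neg (fun h => hx h.symm)]

-- stability of PySem's sort: the equal-key elements keep their order, so
-- filtering the sorted list by one key gives the original-order sublist
theorem pvInsertBy_filter (t : Int) (x : Int × Int) (ys : List (Int × Int))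
    (hs : ys.Pairwise (fun a b => a.2 ≤ b.2)) :
    (PySem.List.insertBy (fun a b => decide (a.2 < b.2)) x ys).filter (fun q => q.2 == t)
      = if x.2 = t then ys.filter (fun q => q.2 == t) ++ [x] else ys.filter (fun q => q.2 == t) := by
  induction ys with
  | nil =>
    simp only [PySem.List.insertBy]
    by_cases hx : x.2 = t <;> simp [hx]
  | cons y ys ih =>
    have hy : ∀ z ∈ ys, y.2 ≤ z.2 := (List.pairwise_cons.mp hs).1
    have hys := (List.pairwise_cons.mp hs).2
    simp only [PySem.List.insertBy]
    by_cases hlt : x.2 < y.2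
    · rw [if_pos (by simp [hlt])]
      by_cases hx : x.2 = t
      · have hyt : (y.2 == t) = false := by simp only [beq_eq_false_iff_ne]; omega
        have hfys : ys.filter (fun q => q.2 == t) = [] := by
          rw [List.filter_eq_nil_iff]
          intro z hz
          have := hy z hz
          simp only [beq_iff_eq]
          omega
        simp [hx, hyt, hfys]
      · simp [List.filter_cons, hx]
    · rw [if_neg (by simp [hlt])]
      rw [List.filter_cons, List.filter_cons, ih hys]
      by_cases hx : x.2 = t <;> by_cases hyt : y.2 = t <;> simp [hx, hyt]

theorem pvSorted_filter (al : List (Int × Int)) (t : Int) :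
    (PySem.List.sorted al (fun a => a.2) false).filter (fun q => q.2 == t)
      = al.filter (fun q => q.2 == t) := by
  induction al using List.reverseRecOn with
  | nil => rw [PySem.List.sorted_eq_foldl_insertBy]; rfl
  | append_singleton al x ih =>
    have hstep : PySem.List.sorted (al ++ [x]) (fun a => a.2) false
        = PySem.List.insertBy (fun a b => decide (a.2 < b.2)) x
            (PySem.List.sorted al (fun a => a.2) false) := by
      rw [PySem.List.sorted_eq_foldl_insertBy, PySem.List.sorted_eq_foldl_insertBy,
        List.foldl_append, List.foldl_cons, List.foldl_nil]
    rw [hstep, pvInsertBy_filter t x _ (PySem.List.sorted_pairwise al (fun a => a.2)),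
      List.filter_append]
    by_cases hx : x.2 = t <;> simp [hx, ih]

theorem pvInj (al : List (Int × Int)) (N : Nat)
    (hr : ∀ p ∈ al, PySem.Raise.InRange N p.2)
    (hal : ∀ p ∈ al, p.2 < 0 → ∀ q ∈ al, q.2 ≠ p.2 + (N : Int)) :
    ∀ p ∈ al, ∀ q ∈ al, pvSlot p.2 N = pvSlot q.2 N → p.2 = q.2 := by
  intro p hp q hq hpq
  have h1 := hr p hp
  have h2 := hr q hq
  unfold PySem.Raise.InRange at h1 h2
  unfold pvSlot at hpq
  split_ifs at hpq with a b b
  · omega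
  · exact absurd (by omega : p.2 = q.2 + (N : Int)) (fun h => hal q hq (by omega) p hp (by omega))
  · exact absurd (by omega : q.2 = p.2 + (N : Int)) (hal p hp (by omega) q hq)
  · omega

-- ===== VERDICT (by name: the statement is the Claim_ definition above) =====
theorem map_alignments_to_target_spec : Claim_equal_map_alignments_to_target := by
  intro al tl _ hpre
  obtain ⟨hr, hal⟩ := hpre
  unfold Spec_map_alignments_to_target map_alignments_to_target map_alignments_to_target_alt
  show al.foldl pvAStep (List.replicate (pvLen al tl) none)
      = pvSweep al.length (PySem.List.sorted al (fun a => a.2) false)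
          (List.replicate (pvLen al tl) none)
  set N := pvLen al tl with hN
  apply List.ext_getElem
  · rw [pvLenA, pvLenB, List.length_replicate]
  · intro n h1 h2
    have hn : n < N := by rwa [pvLenA, List.length_replicate] at h1
    have e1 : (al.foldl pvAStep (List.replicate N none))[n]'h1
        = PySem.List.pyGetD (al.foldl pvAStep (List.replicate N none)) (n : Int) none := by
      rw [PySem.List.pyGetD_eq_getElem _ _ (by exact_mod_cast Nat.zero_le n)
        (by rw [pvLenA, List.length_replicate]; exact_mod_cast hn)]
      simp
    have e2 : (pvSweep al.length (PySem.List.sorted al (fun a => a.2) false)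
          (List.replicate N none))[n]'h2
        = PySem.List.pyGetD (pvSweep al.length (PySem.List.sorted al (fun a => a.2) false)
            (List.replicate N none)) (n : Int) none := by
      rw [PySem.List.pyGetD_eq_getElem _ _ (by exact_mod_cast Nat.zero_le n)
        (by rw [pvLenB, List.length_replicate]; exact_mod_cast hn)]
      simp
    rw [e1, e2, pvA_get N al hr n hn]
    rw [pvB_get al.length (PySem.List.sorted al (fun a => a.2) false) (List.replicate N none)
      (by rw [PySem.List.length_sorted])
      (PySem.List.sorted_pairwise al (fun a => a.2))
      (by intro p hp
          rw [List.length_replicate]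
          exact hr p ((PySem.List.mem_sorted _ _ _ _).mp hp))
      (by intro a ha b hb
          rw [List.length_replicate]
          exact pvInj al N hr hal a ((PySem.List.mem_sorted _ _ _ _).mp ha)
            b ((PySem.List.mem_sorted _ _ _ _).mp hb))
      n (by rw [List.length_replicate]; exact hn)]
    simp only [List.length_replicate]
    cases hfind : (PySem.List.sorted al (fun a => a.2) false).find?
        (fun p => pvSlot p.2 N == n) with
    | some p =>
      have hpal : p ∈ al := (PySem.List.mem_sorted _ _ _ _).mp (List.mem_of_find?_eq_some hfind)
      have hslotp : pvSlot p.2 N = n := by simpa using List.find?_some hfind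
      show pvBucket al N n
          = some ((((PySem.List.sorted al (fun a => a.2) false).filter
              (fun q => q.2 == p.2)).map (fun q => q.1)))
      rw [pvSorted_filter al p.2]
      have hfeq : al.filter (fun q => pvSlot q.2 N == n) = al.filter (fun q => q.2 == p.2) := by
        apply List.filter_congr
        intro q hq
        by_cases h : q.2 = p.2
        · simp [h, hslotp]
        · have hqn : pvSlot q.2 N ≠ n := fun hc =>
            h (pvInj al N hr hal q hq p hpal (by rw [hc, hslotp]))
          simp [h, hqn]
      unfold pvBucket
      rw [hfeq]
      have hne : al.filter (fun q => q.2 == p.2) ≠ [] := by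
        intro h0
        have hmem : p ∈ al.filter (fun q => q.2 == p.2) := List.mem_filter.mpr ⟨hpal, by simp⟩
        rw [h0] at hmem
        cases hmem
      cases hflt : al.filter (fun q => q.2 == p.2) with
      | nil => exact absurd hflt hne
      | cons a as => rfl
    | none =>
      have hnone : ∀ q ∈ al, pvSlot q.2 N ≠ n := by
        intro q hq hc
        have hq' := List.find?_eq_none.mp hfind q ((PySem.List.mem_sorted _ _ _ _).mpr hq)
        simp [hc] at hq'
      show pvBucket al N n = PySem.List.pyGetD (List.replicate N none) (n : Int) none
      unfold pvBucket
      have hflt : al.filter (fun q => pvSlot q.2 N == n) = [] :=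
        List.filter_eq_nil_iff.mpr (fun q hq => by simp [hnone q hq])
      rw [hflt, PySem.List.pyGetD_natCast]
      simp [hn]
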